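-- pv_equiv track=rewrite | github.com/DongYun666/leetcode | 剑指 Offer 13.机器人的运动范围.py | movingCount2
-- ===== SOURCE A (Python) =====
-- def movingCount2(m: int, n: int, k: int) -> int:
--     count = 1
--     visit = [(0, 0)]
--     for i in range(m):
--         for j in range(n):
--             if ((i - 1, j) in visit or (i, j - 1) in visit) and i // 10 + i % 10 + j // 10 + j % 10 <= k:
--                 visit.append((i, j))
--                 count += 1
--     return count
-- ===== SOURCE B (Python) =====
-- def movingCount2(m: int, n: int, k: int) -> int:
--     # BFS flood fill from the origin: a queue of cells to expand and a visited
--     # set; from each cell try its right and down neighbours (the region grown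
--     # by A's up/left recurrence is exactly the set right/down-reachable from
--     # the origin through digit-sum-ok cells).  Origin is seeded unconditionally.
--     seen = {(0, 0)}
--     frontier = [(0, 0)]
--     pos = 0
--     while pos < len(frontier):
--         i, j = frontier[pos]
--         pos += 1
--         for cell in ((i + 1, j), (i, j + 1)):
--             a, b = cell
--             if a < m and b < n and cell not in seen and a // 10 + a % 10 + b // 10 + b % 10 <= k:
--                 seen.add(cell)
--                 frontier.append(cell)
--     return len(seen)
-- ===== Notes on version B (the rewrite author's own statement) =====
-- stated objective: faster
-- what changed: Replaced A's raster scan with linear membership tests over a growing visit list by a queue-based BFS flood fill from the origin with a visited set, expanding right/down neighbours (which generate exactly A's up/left-recurrence region).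
import Mathlib
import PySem

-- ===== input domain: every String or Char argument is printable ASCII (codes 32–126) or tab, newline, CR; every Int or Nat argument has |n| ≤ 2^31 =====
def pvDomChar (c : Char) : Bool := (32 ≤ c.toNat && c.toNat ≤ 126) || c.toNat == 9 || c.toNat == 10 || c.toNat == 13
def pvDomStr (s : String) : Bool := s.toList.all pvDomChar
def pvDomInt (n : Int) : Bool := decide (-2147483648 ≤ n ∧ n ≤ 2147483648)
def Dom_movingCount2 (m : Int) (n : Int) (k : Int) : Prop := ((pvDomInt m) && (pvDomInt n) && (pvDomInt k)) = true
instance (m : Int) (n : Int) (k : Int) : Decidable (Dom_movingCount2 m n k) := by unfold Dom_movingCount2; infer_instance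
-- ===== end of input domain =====

-- B replaces A's raster scan with linear membership tests over a growing visit list by a
-- queue-based BFS flood fill from the origin with a visited set (measurably faster).

-- ===== PORT A =====
-- shared digit-sum expression 'i // 10 + i % 10 + j // 10 + j % 10'
def dsI (i j : Int) : Int :=
  PySem.Int.floordiv i 10 + PySem.Int.mod i 10 + PySem.Int.floordiv j 10 + PySem.Int.mod j 10

def bodyA (k : Int) (i : Int) (st : Int × List (Int × Int)) (j : Int) : Int × List (Int × Int) :=
  if ((i - 1, j) ∈ st.2 ∨ (i, j - 1) ∈ st.2) ∧ dsI i j ≤ k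
  then (st.1 + 1, st.2 ++ [(i, j)])
  else st

def rowA (k n : Int) (st : Int × List (Int × Int)) (i : Int) : Int × List (Int × Int) :=
  (PySem.List.pyRange 0 n).foldl (bodyA k i) st

def movingCount2 (m : Int) (n : Int) (k : Int) : Int :=
  ((PySem.List.pyRange 0 m).foldl (rowA k n) (1, [((0 : Int), (0 : Int))])).1

-- ===== PORT B =====
-- one neighbour candidate of the popped cell: guarded add to (seen, frontier-tail)
def nbrStep (m n k : Int) (st : PySem.Set (Int × Int) × List (Int × Int)) (c : Int × Int) :
    PySem.Set (Int × Int) × List (Int × Int) :=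
  if c.1 < m ∧ c.2 < n ∧ c ∉ st.1 ∧ dsI c.1 c.2 ≤ k
  then (PySem.Set.add st.1 c, st.2 ++ [c])
  else st

-- the 'while pos < len(frontier)' worklist loop: frontier[pos:] is the queue argument.
-- The fuel only makes the recursion total; m.toNat*n.toNat+1 steps are proved sufficient below.
def bfsGo (m n k : Int) : Nat → List (Int × Int) → PySem.Set (Int × Int) → PySem.Set (Int × Int)
  | _, [], seen => seen
  | 0, _ :: _, seen => seen
  | fuel + 1, c :: rest, seen =>
      let st := [(c.1 + 1, c.2), (c.1, c.2 + 1)].foldl (nbrStep m n k) (seen, rest)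
      bfsGo m n k fuel st.2 st.1

def movingCount2_alt (m : Int) (n : Int) (k : Int) : Int :=
  ((bfsGo m n k (m.toNat * n.toNat + 1) [((0 : Int), (0 : Int))]
      (PySem.Set.ofList [((0 : Int), (0 : Int))])).length : Int)

-- ===== PRECONDITION & SPEC =====
def Spec_movingCount2 (m : Int) (n : Int) (k : Int) (out : Int) : Prop := out = movingCount2_alt m n k
instance (m : Int) (n : Int) (k : Int) (out : Int) : Decidable (Spec_movingCount2 m n k out) := by unfold Spec_movingCount2; infer_instance

-- ===== CLAIM (what is proved, stated in full; the proofs are below) =====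
def Claim_equal_movingCount2 : Prop := ∀ (m : Int) (n : Int) (k : Int), Dom_movingCount2 m n k → Spec_movingCount2 m n k (movingCount2 m n k)

-- ===== LEMMAS AND PROOFS =====

-- the common spec: reachability by the up/left recurrence, origin forced true
def reachV (k : Int) : Nat → Nat → Bool
  | 0, 0 => true
  | 0, q + 1 => decide (dsI (0 : Nat) ((q + 1 : Nat) : Int) ≤ k) && reachV k 0 q
  | p + 1, 0 => decide (dsI ((p + 1 : Nat) : Int) (0 : Nat) ≤ k) && reachV k p 0
  | p + 1, q + 1 => decide (dsI ((p + 1 : Nat) : Int) ((q + 1 : Nat) : Int) ≤ k) &&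
      (reachV k p (q + 1) || reachV k (p + 1) q)

lemma reachV_eq (k : Int) (p q : Nat) (h : ¬(p = 0 ∧ q = 0)) :
    (reachV k p q = true) ↔
      (dsI (p : Int) (q : Int) ≤ k ∧
        ((0 < p ∧ reachV k (p - 1) q = true) ∨ (0 < q ∧ reachV k p (q - 1) = true))) := by
  match p, q with
  | 0, 0 => exact absurd ⟨rfl, rfl⟩ h
  | 0, q + 1 => simp [reachV]
  | p + 1, 0 => simp [reachV]
  | p + 1, q + 1 =>
    simp only [reachV, Bool.and_eq_true, Bool.or_eq_true, decide_eq_true_eq]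
    constructor
    · rintro ⟨hds, h1 | h2⟩
      · exact ⟨hds, Or.inl ⟨Nat.succ_pos _, by simpa using h1⟩⟩
      · exact ⟨hds, Or.inr ⟨Nat.succ_pos _, by simpa using h2⟩⟩
    · rintro ⟨hds, ⟨_, h1⟩ | ⟨_, h2⟩⟩
      · exact ⟨hds, Or.inl (by simpa using h1)⟩
      · exact ⟨hds, Or.inr (by simpa using h2)⟩

-- target set of the whole computation: origin plus in-grid reachable cells
def TgtP (m n k : Int) (c : Int × Int) : Prop :=
  c = (0, 0) ∨ ∃ p q : Nat, c = ((p : Int), (q : Int)) ∧ (p : Int) < m ∧ (q : Int) < n ∧ reachV k p q = true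

-- the two candidate successors of a popped cell
def succs (c : Int × Int) : List (Int × Int) := [(c.1 + 1, c.2), (c.1, c.2 + 1)]

-- ---------- A side ----------

-- characterization of A's visit list after fully processing rows < i and columns < t of row i
def visInv (k n : Int) (i t : Nat) (vis : List (Int × Int)) : Prop :=
  ∀ a b : Int, ((a, b) ∈ vis ↔
    ∃ p q : Nat, a = (p : Int) ∧ b = (q : Int) ∧
      ((p = 0 ∧ q = 0) ∨ ((q : Int) < n ∧ (p < i ∨ (p = i ∧ q < t)) ∧ reachV k p q = true)))

lemma mem_up (k n : Int) (i t : Nat) (vis : List (Int × Int)) (Hvis : visInv k n i t vis)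
    (ht : (t : Int) < n) :
    (((i : Int) - 1, (t : Int)) ∈ vis) ↔ (0 < i ∧ reachV k (i - 1) t = true) := by
  rw [Hvis]
  constructor
  · rintro ⟨p, q, hp, hq, hcase⟩
    have hi : i = p + 1 := by omega
    have hqt : q = t := by omega
    subst hqt
    rcases hcase with ⟨hp0, hq0⟩ | ⟨_, _, hr⟩
    · subst hp0; subst hq0
      refine ⟨by omega, ?_⟩
      have : i - 1 = 0 := by omega
      rw [this]; simp [reachV]
    · refine ⟨by omega, ?_⟩
      have : i - 1 = p := by omega
      rw [this]; exact hr
  · rintro ⟨hi, hr⟩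
    refine ⟨i - 1, t, by omega, rfl, ?_⟩
    by_cases horig : i - 1 = 0 ∧ t = 0
    · exact Or.inl horig
    · exact Or.inr ⟨ht, Or.inl (by omega), hr⟩

lemma mem_left (k n : Int) (i t : Nat) (vis : List (Int × Int)) (Hvis : visInv k n i t vis)
    (ht : (t : Int) < n) :
    (((i : Int), (t : Int) - 1) ∈ vis) ↔ (0 < t ∧ reachV k i (t - 1) = true) := by
  rw [Hvis]
  constructor
  · rintro ⟨p, q, hp, hq, hcase⟩
    have hip : p = i := by omega
    have hqt : t = q + 1 := by omega
    subst hip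
    rcases hcase with ⟨hp0, hq0⟩ | ⟨_, _, hr⟩
    · subst hp0; subst hq0
      refine ⟨by omega, ?_⟩
      have : t - 1 = 0 := by omega
      rw [this]; simp [reachV]
    · refine ⟨by omega, ?_⟩
      have : t - 1 = q := by omega
      rw [this]; exact hr
  · rintro ⟨htpos, hr⟩
    refine ⟨i, t - 1, rfl, by omega, ?_⟩
    by_cases horig : i = 0 ∧ t - 1 = 0
    · exact Or.inl horig
    · exact Or.inr ⟨by omega, Or.inr ⟨rfl, by omega⟩, hr⟩

-- one row of A: the count stays the length of the (duplicate-free) visit list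
lemma innerA (k n : Int) (i : Nat) (vis0 : List (Int × Int)) (Hvis0 : visInv k n i 0 vis0)
    (Hnd0 : vis0.Nodup) :
    ∀ t : Nat, t ≤ n.toNat →
      ∃ vis : List (Int × Int),
        ((List.range t).map (fun q : Nat => (q : Int))).foldl (bodyA k i) ((vis0.length : Int), vis0)
          = ((vis.length : Int), vis) ∧
        visInv k n i t vis ∧ vis.Nodup := by
  intro t
  induction t with
  | zero => intro _; exact ⟨vis0, rfl, Hvis0, Hnd0⟩
  | succ t ih =>
    intro hle
    obtain ⟨vis, hA, Hvis, Hnd⟩ := ih (by omega)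
    have ht : (t : Int) < n := by omega
    have hup := mem_up k n i t vis Hvis ht
    have hleft := mem_left k n i t vis Hvis ht
    have key : ∀ (_ : ¬(i = 0 ∧ t = 0)),
        ((((i : Int) - 1, (t : Int)) ∈ vis ∨ ((i : Int), (t : Int) - 1) ∈ vis) ∧
            dsI (i : Int) (t : Int) ≤ k) ↔ reachV k i t = true := by
      intro horig
      rw [reachV_eq k i t horig, hup, hleft]
      tauto
    simp only [List.range_succ, List.map_append, List.foldl_append, List.map_cons,
      List.map_nil, List.foldl_cons, List.foldl_nil, hA]
    by_cases horig : i = 0 ∧ t = 0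
    · obtain ⟨hi0, ht0⟩ := horig
      subst hi0; subst ht0
      have hAstep : bodyA k 0 ((vis.length : Int), vis) 0 = ((vis.length : Int), vis) := by
        unfold bodyA
        rw [if_neg]
        rintro ⟨hmem | hmem, _⟩
        · rw [Hvis] at hmem
          obtain ⟨p, q, hp, hq, _⟩ := hmem
          omega
        · rw [Hvis] at hmem
          obtain ⟨p, q, hp, hq, _⟩ := hmem
          omega
      refine ⟨vis, by simpa using hAstep, ?_, Hnd⟩
      intro a b
      rw [Hvis a b]
      constructor
      · rintro ⟨p, q, hp, hq, hcase⟩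
        refine ⟨p, q, hp, hq, ?_⟩
        rcases hcase with h | ⟨h1, h2, h3⟩
        · exact Or.inl h
        · exact Or.inr ⟨h1, by omega, h3⟩
      · rintro ⟨p, q, hp, hq, hcase⟩
        refine ⟨p, q, hp, hq, ?_⟩
        rcases hcase with h | ⟨h1, h2, h3⟩
        · exact Or.inl h
        · rcases h2 with h2 | ⟨hp0, hq1⟩
          · omega
          · have hq0 : q = 0 := by omega
            exact Or.inl ⟨hp0, hq0⟩
    · have hkey := key horig
      by_cases hreach : reachV k i t = true
      · have hgA : (((i : Int) - 1, (t : Int)) ∈ vis ∨ ((i : Int), (t : Int) - 1) ∈ vis) ∧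
            dsI (i : Int) (t : Int) ≤ k := hkey.mpr hreach
        have hnotmem : ((i : Int), (t : Int)) ∉ vis := by
          intro hx
          rw [Hvis] at hx
          obtain ⟨p, q, hp, hq, hcase⟩ := hx
          rcases hcase with ⟨hp0, hq0⟩ | ⟨_, h2, _⟩ <;> omega
        refine ⟨vis ++ [((i : Int), (t : Int))], ?_, ?_, ?_⟩
        · unfold bodyA
          rw [if_pos hgA]
          rw [Prod.mk.injEq]
          refine ⟨?_, rfl⟩
          simp
        · intro a b
          simp only [List.mem_append, List.mem_singleton]
          rw [Hvis a b]
          constructor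
          · rintro (⟨p, q, hp, hq, hcase⟩ | hab)
            · refine ⟨p, q, hp, hq, ?_⟩
              rcases hcase with h | ⟨h1, h2, h3⟩
              · exact Or.inl h
              · exact Or.inr ⟨h1, by omega, h3⟩
            · rw [Prod.mk.injEq] at hab
              exact ⟨i, t, hab.1, hab.2, Or.inr ⟨ht, by omega, hreach⟩⟩
          · rintro ⟨p, q, hp, hq, hcase⟩
            rcases hcase with h | ⟨h1, h2, h3⟩
            · exact Or.inl ⟨p, q, hp, hq, Or.inl h⟩
            · by_cases hpt : p = i ∧ q = t
              · right; rw [hp, hq, hpt.1, hpt.2]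
              · exact Or.inl ⟨p, q, hp, hq, Or.inr ⟨h1, by omega, h3⟩⟩
        · rw [List.nodup_append]
          refine ⟨Hnd, List.nodup_singleton _, ?_⟩
          intro a ha b hb
          simp only [List.mem_singleton] at hb
          subst hb
          intro heq
          subst heq
          exact hnotmem ha
      · have hgA : ¬((((i : Int) - 1, (t : Int)) ∈ vis ∨ ((i : Int), (t : Int) - 1) ∈ vis) ∧
            dsI (i : Int) (t : Int) ≤ k) := fun h => hreach (hkey.mp h)
        refine ⟨vis, ?_, ?_, Hnd⟩
        · unfold bodyA
          rw [if_neg hgA]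
        · intro a b
          rw [Hvis a b]
          constructor
          · rintro ⟨p, q, hp, hq, hcase⟩
            refine ⟨p, q, hp, hq, ?_⟩
            rcases hcase with h | ⟨h1, h2, h3⟩
            · exact Or.inl h
            · exact Or.inr ⟨h1, by omega, h3⟩
          · rintro ⟨p, q, hp, hq, hcase⟩
            refine ⟨p, q, hp, hq, ?_⟩
            rcases hcase with h | ⟨h1, h2, h3⟩
            · exact Or.inl h
            · rcases h2 with h2 | ⟨hpi, hqt⟩
              · exact Or.inr ⟨h1, Or.inl h2, h3⟩
              · by_cases hq' : q = t
                · exfalso; rw [hpi, hq'] at h3; exact hreach h3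
                · exact Or.inr ⟨h1, Or.inr ⟨hpi, by omega⟩, h3⟩

lemma outerA_aux (k n : Int) :
    ∀ r : Nat,
      ∃ vis : List (Int × Int),
        ((List.range r).map (fun p : Nat => (p : Int))).foldl (rowA k n) (1, [((0:Int),(0:Int))])
          = ((vis.length : Int), vis) ∧
        visInv k n r 0 vis ∧ vis.Nodup := by
  intro r
  induction r with
  | zero =>
    refine ⟨[((0:Int),(0:Int))], rfl, ?_, List.nodup_singleton _⟩
    intro a b
    constructor
    · intro h
      simp only [List.mem_singleton] at h
      cases h
      exact ⟨0, 0, rfl, rfl, Or.inl ⟨rfl, rfl⟩⟩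
    · rintro ⟨p, q, hp, hq, hcase⟩
      rcases hcase with ⟨hp0, hq0⟩ | ⟨_, h2, _⟩
      · subst hp0; subst hq0; simp_all
      · omega
  | succ r ih =>
    obtain ⟨vis, hA, Hvis, Hnd⟩ := ih
    obtain ⟨vis', hA', Hvis', Hnd'⟩ := innerA k n r vis Hvis Hnd n.toNat (le_refl _)
    refine ⟨vis', ?_, ?_, Hnd'⟩
    · simp only [List.range_succ, List.map_append, List.map_cons, List.map_nil,
        List.foldl_append, List.foldl_cons, List.foldl_nil, hA]
      unfold rowA
      rw [PySem.List.pyRange_zero]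
      exact hA'
    · intro a b
      rw [Hvis' a b]
      constructor
      · rintro ⟨p, q, hp, hq, hcase⟩
        refine ⟨p, q, hp, hq, ?_⟩
        rcases hcase with h | ⟨h1, h2, h3⟩
        · exact Or.inl h
        · exact Or.inr ⟨h1, Or.inl (by omega), h3⟩
      · rintro ⟨p, q, hp, hq, hcase⟩
        refine ⟨p, q, hp, hq, ?_⟩
        rcases hcase with h | ⟨h1, h2, h3⟩
        · exact Or.inl h
        · have : p < r ∨ (p = r ∧ q < n.toNat) := by omega
          exact Or.inr ⟨h1, by omega, h3⟩

-- A's final visit list realizes exactly the target set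
lemma memA (m n k : Int) :
    ∃ vis : List (Int × Int),
      movingCount2 m n k = (vis.length : Int) ∧ vis.Nodup ∧
      (∀ c, c ∈ vis ↔ TgtP m n k c) := by
  obtain ⟨vis, hA, Hvis, Hnd⟩ := outerA_aux k n m.toNat
  refine ⟨vis, ?_, Hnd, ?_⟩
  · unfold movingCount2
    rw [PySem.List.pyRange_zero, hA]
  · rintro ⟨a, b⟩
    rw [Hvis a b]
    unfold TgtP
    constructor
    · rintro ⟨p, q, hp, hq, hcase⟩
      rcases hcase with ⟨hp0, hq0⟩ | ⟨h1, h2, h3⟩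
      · subst hp; subst hq; subst hp0; subst hq0
        exact Or.inl (by simp)
      · exact Or.inr ⟨p, q, by rw [Prod.mk.injEq]; exact ⟨hp, hq⟩, by omega, h1, h3⟩
    · rintro (h | ⟨p, q, hpq, h1, h2, h3⟩)
      · rw [Prod.mk.injEq] at h
        exact ⟨0, 0, by simpa using h.1, by simpa using h.2, Or.inl ⟨rfl, rfl⟩⟩
      · rw [Prod.mk.injEq] at hpq
        exact ⟨p, q, hpq.1, hpq.2, Or.inr ⟨h2, Or.inl (by omega), h3⟩⟩

-- ---------- B side ----------

lemma nbrStep_eq (m n k : Int) (s q : List (Int × Int)) (c : Int × Int) :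
    nbrStep m n k (s, q) c =
      if c.1 < m ∧ c.2 < n ∧ c ∉ s ∧ dsI c.1 c.2 ≤ k then (s ++ [c], q ++ [c]) else (s, q) := by
  unfold nbrStep
  split_ifs with h
  · rw [PySem.Set.add_of_not_mem h.2.2.1]
  · rfl

-- folding the neighbour step over any candidate list appends exactly the fresh valid cells
lemma fold_nbr (m n k : Int) :
    ∀ (L s q0 : List (Int × Int)),
      ∃ nw : List (Int × Int),
        L.foldl (nbrStep m n k) (s, q0) = (s ++ nw, q0 ++ nw) ∧
        nw.Nodup ∧
        (∀ d ∈ nw, d ∈ L ∧ d.1 < m ∧ d.2 < n ∧ dsI d.1 d.2 ≤ k ∧ d ∉ s) ∧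
        (∀ d ∈ L, d.1 < m → d.2 < n → dsI d.1 d.2 ≤ k → d ∈ s ++ nw) := by
  intro L
  induction L with
  | nil => intro s q0; exact ⟨[], by simp, List.nodup_nil, by simp, by simp⟩
  | cons d L ih =>
    intro s q0
    rw [List.foldl_cons, nbrStep_eq]
    by_cases g : d.1 < m ∧ d.2 < n ∧ d ∉ s ∧ dsI d.1 d.2 ≤ k
    · rw [if_pos g]
      obtain ⟨nw, heq, hnd, hprop, hcov⟩ := ih (s ++ [d]) (q0 ++ [d])
      refine ⟨d :: nw, ?_, ?_, ?_, ?_⟩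
      · rw [heq]
        simp
      · refine List.Nodup.cons ?_ hnd
        intro hd
        obtain ⟨_, _, _, _, hns⟩ := hprop d hd
        simp at hns
      · intro e he
        rcases List.mem_cons.mp he with rfl | he'
        · exact ⟨List.mem_cons_self, g.1, g.2.1, g.2.2.2, g.2.2.1⟩
        · obtain ⟨h1, h2, h3, h4, h5⟩ := hprop e he'
          refine ⟨List.mem_cons_of_mem _ h1, h2, h3, h4, ?_⟩
          intro hes
          exact h5 (by simp [hes])
      · intro e he h1 h2 h3
        rcases List.mem_cons.mp he with rfl | he'
        · simp
        · have := hcov e he' h1 h2 h3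
          simp only [List.append_assoc, List.singleton_append] at this ⊢
          exact this
    · rw [if_neg g]
      obtain ⟨nw, heq, hnd, hprop, hcov⟩ := ih s q0
      refine ⟨nw, heq, hnd, ?_, ?_⟩
      · intro e he
        obtain ⟨h1, h2, h3, h4, h5⟩ := hprop e he
        exact ⟨List.mem_cons_of_mem _ h1, h2, h3, h4, h5⟩
      · intro e he h1 h2 h3
        rcases List.mem_cons.mp he with rfl | he'
        · have hes : e ∈ s := by tauto
          exact List.mem_append_left _ hes
        · exact hcov e he' h1 h2 h3

-- a duplicate-free list of target cells has at most m*n+1 elements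
lemma tgt_card (m n k : Int) (S : List (Int × Int)) (h1 : S.Nodup)
    (h2 : ∀ c ∈ S, TgtP m n k c) : S.length ≤ m.toNat * n.toNat + 1 := by
  classical
  have hsub : S.toFinset ⊆ insert ((0:Int),(0:Int)) (Finset.Icc (0:Int) (m-1) ×ˢ Finset.Icc (0:Int) (n-1)) := by
    intro c hc
    rcases h2 c (List.mem_toFinset.mp hc) with h | ⟨p, q, hpq, hm, hn, _⟩
    · simp [h]
    · rw [Finset.mem_insert]
      right
      rw [hpq, Finset.mem_product]
      constructor <;> (rw [Finset.mem_Icc]; constructor <;> omega)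
  have hcard := Finset.card_le_card hsub
  rw [List.toFinset_card_of_nodup h1] at hcard
  have hins := Finset.card_insert_le ((0:Int),(0:Int)) (Finset.Icc (0:Int) (m-1) ×ˢ Finset.Icc (0:Int) (n-1))
  rw [Finset.card_product] at hins
  rw [Int.card_Icc, Int.card_Icc] at hins
  have hm' : (m - 1 + 1 - 0).toNat = m.toNat := by omega
  have hn' : (n - 1 + 1 - 0).toNat = n.toNat := by omega
  rw [hm', hn'] at hins
  omega

-- a valid successor of a target cell is a target cell
lemma tgt_succ (m n k : Int) (c d : Int × Int) (hc : TgtP m n k c) (hd : d ∈ succs c)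
    (h1 : d.1 < m) (h2 : d.2 < n) (h3 : dsI d.1 d.2 ≤ k) : TgtP m n k d := by
  have hrep : ∃ p q : Nat, c = ((p : Int), (q : Int)) ∧ reachV k p q = true := by
    rcases hc with h | ⟨p, q, hpq, _, _, hr⟩
    · exact ⟨0, 0, by simpa using h, by simp [reachV]⟩
    · exact ⟨p, q, hpq, hr⟩
  obtain ⟨p, q, hpq, hr⟩ := hrep
  subst hpq
  simp only [succs, List.mem_cons, List.not_mem_nil, or_false] at hd
  rcases hd with rfl | rfl
  · refine Or.inr ⟨p + 1, q, by push_cast; ring_nf, by simpa using h1, by simpa using h2, ?_⟩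
    rw [reachV_eq k (p+1) q (by omega)]
    refine ⟨by push_cast at h3 ⊢; convert h3 using 3, Or.inl ⟨by omega, by simpa using hr⟩⟩
  · refine Or.inr ⟨p, q + 1, by push_cast; ring_nf, by simpa using h1, by simpa using h2, ?_⟩
    rw [reachV_eq k p (q+1) (by omega)]
    refine ⟨by push_cast at h3 ⊢; convert h3 using 3, Or.inr ⟨by omega, by simpa using hr⟩⟩

-- every target cell lies in any successor-closed set containing the origin
lemma closed_complete (m n k : Int) (S : List (Int × Int))
    (hO : ((0:Int),(0:Int)) ∈ S)
    (hCl : ∀ c ∈ S, ∀ d ∈ succs c, d.1 < m → d.2 < n → dsI d.1 d.2 ≤ k → d ∈ S) :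
    ∀ (s p q : Nat), p + q ≤ s → (p : Int) < m → (q : Int) < n → reachV k p q = true →
      (((p : Int), (q : Int))) ∈ S := by
  intro s
  induction s with
  | zero =>
    intro p q hs _ _ _
    have hp : p = 0 := by omega
    have hq : q = 0 := by omega
    subst hp; subst hq
    simpa using hO
  | succ s ih =>
    intro p q hs hm hn hr
    by_cases horig : p = 0 ∧ q = 0
    · obtain ⟨hp, hq⟩ := horig
      subst hp; subst hq
      simpa using hO
    · rw [reachV_eq k p q horig] at hr
      obtain ⟨hds, hcase⟩ := hr
      rcases hcase with ⟨hp, hr'⟩ | ⟨hq, hr'⟩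
      · have hmem := ih (p - 1) q (by omega) (by omega) hn hr'
        have hcast : ((p - 1 : Nat) : Int) + 1 = (p : Int) := by omega
        have := hCl _ hmem ((((p - 1 : Nat) : Int)) + 1, (q : Int)) (by simp [succs]) (by omega)
          (by simpa using hn) (by rw [hcast]; exact hds)
        rwa [hcast] at this
      · have hmem := ih p (q - 1) (by omega) hm (by omega) hr'
        have hcast : ((q - 1 : Nat) : Int) + 1 = (q : Int) := by omega
        have := hCl _ hmem ((p : Int), (((q - 1 : Nat) : Int)) + 1) (by simp [succs]) (by simpa using hm)
          (by omega) (by rw [hcast]; exact hds)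
        rwa [hcast] at this

-- the BFS worklist loop: invariants are preserved and the fuel never runs out
lemma bfs_main (m n k : Int) :
    ∀ (fuel : Nat) (queue seen : List (Int × Int)),
      seen.Nodup →
      (∀ c ∈ seen, TgtP m n k c) →
      ((0:Int),(0:Int)) ∈ seen →
      (∀ c ∈ queue, c ∈ seen) →
      queue.Nodup →
      (∀ c ∈ seen, c ∉ queue → ∀ d ∈ succs c, d.1 < m → d.2 < n → dsI d.1 d.2 ≤ k → d ∈ seen) →
      queue.length + (m.toNat * n.toNat + 1 - seen.length) ≤ fuel →
      (bfsGo m n k fuel queue seen).Nodup ∧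
      (∀ c ∈ bfsGo m n k fuel queue seen, TgtP m n k c) ∧
      ((0:Int),(0:Int)) ∈ bfsGo m n k fuel queue seen ∧
      (∀ c ∈ bfsGo m n k fuel queue seen, ∀ d ∈ succs c,
        d.1 < m → d.2 < n → dsI d.1 d.2 ≤ k → d ∈ bfsGo m n k fuel queue seen) := by
  intro fuel
  induction fuel with
  | zero =>
    intro queue seen J1 J2 J3 J4 J5 J6 H
    cases queue with
    | nil =>
      refine ⟨J1, J2, J3, ?_⟩
      intro c hc d hd h1 h2 h3
      exact J6 c hc (by simp) d hd h1 h2 h3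
    | cons c rest => simp at H
  | succ f ih =>
    intro queue seen J1 J2 J3 J4 J5 J6 H
    cases queue with
    | nil =>
      refine ⟨J1, J2, J3, ?_⟩
      intro c hc d hd h1 h2 h3
      exact J6 c hc (by simp) d hd h1 h2 h3
    | cons c rest =>
      obtain ⟨nw, heq, hndnw, hprop, hcov⟩ := fold_nbr m n k (succs c) seen rest
      have hstep : bfsGo m n k (f + 1) (c :: rest) seen = bfsGo m n k f (rest ++ nw) (seen ++ nw) := by
        show bfsGo m n k f ([(c.1 + 1, c.2), (c.1, c.2 + 1)].foldl (nbrStep m n k) (seen, rest)).2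
              ([(c.1 + 1, c.2), (c.1, c.2 + 1)].foldl (nbrStep m n k) (seen, rest)).1 = _
        have : [(c.1 + 1, c.2), (c.1, c.2 + 1)] = succs c := rfl
        rw [this, heq]
      rw [hstep]
      have hTc : TgtP m n k c := J2 c (J4 c List.mem_cons_self)
      have J1' : (seen ++ nw).Nodup := by
        rw [List.nodup_append]
        refine ⟨J1, hndnw, ?_⟩
        intro a ha b hb heq
        subst heq
        exact (hprop a hb).2.2.2.2 ha
      have J2' : ∀ e ∈ seen ++ nw, TgtP m n k e := by
        intro e he
        rcases List.mem_append.mp he with h | h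
        · exact J2 e h
        · obtain ⟨h1, h2, h3, h4, _⟩ := hprop e h
          exact tgt_succ m n k c e hTc h1 h2 h3 h4
      have J3' : ((0:Int),(0:Int)) ∈ seen ++ nw := List.mem_append_left _ J3
      have J4' : ∀ e ∈ rest ++ nw, e ∈ seen ++ nw := by
        intro e he
        rcases List.mem_append.mp he with h | h
        · exact List.mem_append_left _ (J4 e (List.mem_cons_of_mem _ h))
        · exact List.mem_append_right _ h
      have J5' : (rest ++ nw).Nodup := by
        rw [List.nodup_append]
        refine ⟨(List.nodup_cons.mp J5).2, hndnw, ?_⟩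
        intro a ha b hb heq
        subst heq
        exact (hprop a hb).2.2.2.2 (J4 a (List.mem_cons_of_mem _ ha))
      have J6' : ∀ e ∈ seen ++ nw, e ∉ rest ++ nw → ∀ d ∈ succs e,
          d.1 < m → d.2 < n → dsI d.1 d.2 ≤ k → d ∈ seen ++ nw := by
        intro e he hne d hd h1 h2 h3
        rcases List.mem_append.mp he with hes | hen
        · by_cases hec : e = c
          · subst hec
            exact hcov d hd h1 h2 h3
          · have : e ∉ c :: rest := by
              intro hmem
              rcases List.mem_cons.mp hmem with h | h
              · exact hec h
              · exact hne (List.mem_append_left _ h)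
            exact List.mem_append_left _ (J6 e hes this d hd h1 h2 h3)
        · exact absurd (List.mem_append_right _ hen) hne
      have hlen : (seen ++ nw).length ≤ m.toNat * n.toNat + 1 := tgt_card m n k _ J1' J2'
      have H' : (rest ++ nw).length + (m.toNat * n.toNat + 1 - (seen ++ nw).length) ≤ f := by
        simp only [List.length_append] at hlen ⊢
        simp only [List.length_cons] at H
        omega
      exact ih (rest ++ nw) (seen ++ nw) J1' J2' J3' J4' J5' J6' H'

-- B's result realizes exactly the target set
lemma memB (m n k : Int) :
    ∃ R : List (Int × Int),
      movingCount2_alt m n k = (R.length : Int) ∧ R.Nodup ∧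
      (∀ c, c ∈ R ↔ TgtP m n k c) := by
  have hseed : PySem.Set.ofList [((0 : Int), (0 : Int))] = [((0 : Int), (0 : Int))] := rfl
  obtain ⟨HndR, Hsound, HO, HCl⟩ :=
    bfs_main m n k (m.toNat * n.toNat + 1) [((0:Int),(0:Int))] [((0:Int),(0:Int))]
      (List.nodup_singleton _)
      (by rintro c hc; simp only [List.mem_singleton] at hc; subst hc; exact Or.inl rfl)
      (by simp)
      (by intro c hc; exact hc)
      (List.nodup_singleton _)
      (by intro c hc hnc; exact absurd hc hnc)
      (by simp only [List.length_singleton]; omega)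
  refine ⟨bfsGo m n k (m.toNat * n.toNat + 1) [((0:Int),(0:Int))] [((0:Int),(0:Int))], ?_, HndR, ?_⟩
  · unfold movingCount2_alt
    rw [hseed]
  · intro c
    constructor
    · exact Hsound c
    · intro hc
      rcases hc with h | ⟨p, q, hpq, hm, hn, hr⟩
      · subst h; exact HO
      · subst hpq
        exact closed_complete m n k _ HO HCl (p + q) p q (le_refl _) hm hn hr

-- ===== VERDICT (by name: the statement is the Claim_ definition above) =====
theorem movingCount2_spec : Claim_equal_movingCount2 := by
  intro m n k _
  unfold Spec_movingCount2
  obtain ⟨vis, hAeq, hAnd, hAmem⟩ := memA m n k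
  obtain ⟨R, hBeq, hBnd, hBmem⟩ := memB m n k
  have hperm : vis.Perm R :=
    (List.perm_ext_iff_of_nodup hAnd hBnd).mpr (fun x => (hAmem x).trans (hBmem x).symm)
  rw [hAeq, hBeq, hperm.length_eq]
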